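-- pv_equiv track=rewrite | github.com/ZigaStrgar/programiranje1 | P6/vaje/test_gerry.py | simple_sol
-- ===== SOURCE A (Python) =====
-- def simple_sol(w, h, d, f):
--     rez = []
--     nh = 0
--     count = 0
--     while nh < h:
--         new_line = []
--         nw = 0
--         while nw < w:
--             if count > d - 1:
--                 count = d - 1
--             new_line.append(count)
--             count += 1
--             nw += 1
--         rez.append(new_line)
--         nw = 0
--         nh += 1
--     return rez
-- ===== SOURCE B (Python) =====
-- def simple_sol(w, h, d, f):
--     # Build the flat sequence once: an increasing ramp 0..k-1 followed by a
--     # constant plateau of d-1, then cut it into h contiguous rows of width w.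
--     W, H = max(w, 0), max(h, 0)
--     n = W * H
--     k = min(max(d, 0), n)
--     flat = list(range(k)) + [d - 1] * (n - k)
--     return [flat[r * W:(r + 1) * W] for r in range(H)]
-- ===== Notes on version B (the rewrite author's own statement) =====
-- stated objective: faster
-- what changed: Instead of A's nested while-loops maintaining a running capped counter cell by cell, B constructs the entire flat value sequence in one shot as a ramp list(range(k)) concatenated with a constant plateau [d-1]*(n-k), then cuts it into rows with slices.
import Mathlib
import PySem

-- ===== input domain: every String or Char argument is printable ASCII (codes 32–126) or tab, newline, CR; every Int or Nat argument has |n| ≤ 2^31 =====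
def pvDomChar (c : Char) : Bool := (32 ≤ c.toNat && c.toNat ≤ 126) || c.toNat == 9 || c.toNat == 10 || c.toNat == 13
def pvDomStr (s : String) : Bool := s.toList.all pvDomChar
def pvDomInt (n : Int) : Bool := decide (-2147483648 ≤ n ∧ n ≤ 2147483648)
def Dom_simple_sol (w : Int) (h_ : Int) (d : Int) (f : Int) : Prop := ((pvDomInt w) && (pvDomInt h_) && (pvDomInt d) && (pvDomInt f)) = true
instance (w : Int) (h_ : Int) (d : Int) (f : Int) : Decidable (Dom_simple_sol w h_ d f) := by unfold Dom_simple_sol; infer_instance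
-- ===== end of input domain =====

-- B builds the whole flat value sequence once (an increasing ramp concatenated with a constant
-- plateau of d-1, no per-cell work) and then cuts it into rows by slicing; objective: simpler.

-- ===== PORT A =====
-- inner 'while nw < w' loop of A: appends the capped counter, returns (line, count)
def simpleSolInner (w : Int) (d : Int) (nw : Int) (count : Int) (line : List Int) : List Int × Int :=
  if _h : nw < w then
    let count' := if count > d - 1 then d - 1 else count
    simpleSolInner w d (nw + 1) (count' + 1) (line ++ [count'])
  else (line, count)
termination_by (w - nw).toNat
decreasing_by omega

-- outer 'while nh < h' loop of A
def simpleSolOuter (w : Int) (h_ : Int) (d : Int) (nh : Int) (count : Int) (rez : List (List Int)) : List (List Int) :=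
  if _h : nh < h_ then
    let p := simpleSolInner w d 0 count []
    simpleSolOuter w h_ d (nh + 1) p.2 (rez ++ [p.1])
  else rez
termination_by (h_ - nh).toNat
decreasing_by omega

def simple_sol (w : Int) (h_ : Int) (d : Int) (f : Int) : List (List Int) :=
  simpleSolOuter w h_ d 0 0 []

-- ===== PORT B =====
def simple_sol_alt (w : Int) (h_ : Int) (d : Int) (f : Int) : List (List Int) :=
  let W := max w 0
  let H := max h_ 0
  let n := W * H
  let k := min (max d 0) n
  let flat : List Int :=
    (List.range k.toNat).map (fun i : Nat => (i : Int)) ++ List.replicate (n - k).toNat (d - 1)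
  (PySem.List.pyRange 0 H 1).map (fun r => PySem.List.slice flat (some (r * W)) (some ((r + 1) * W)))

-- ===== PRECONDITION & SPEC =====
def Spec_simple_sol (w : Int) (h_ : Int) (d : Int) (f : Int) (out : List (List Int)) : Prop := out = simple_sol_alt w h_ d f
instance (w : Int) (h_ : Int) (d : Int) (f : Int) (out : List (List Int)) : Decidable (Spec_simple_sol w h_ d f out) := by unfold Spec_simple_sol; infer_instance

-- ===== CLAIM (what is proved, stated in full; the proofs are below) =====
def Claim_equal_simple_sol : Prop := ∀ (w : Int) (h_ : Int) (d : Int) (f : Int), Dom_simple_sol w h_ d f → Spec_simple_sol w h_ d f (simple_sol w h_ d f)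

-- ===== LEMMAS AND PROOFS =====

-- Inner loop characterisation: line of capped values, final counter min (count+k) d (k>0).
theorem simpleSolInner_eq (k : Nat) : ∀ (w d nw count : Int) (line : List Int),
    (w - nw).toNat = k →
    simpleSolInner w d nw count line =
      (line ++ (List.range k).map (fun j : Nat => min (count + (j : Int)) (d - 1)),
       if k = 0 then count else min (count + (k : Int)) d) := by
  induction k with
  | zero =>
    intro w d nw count line hk
    rw [simpleSolInner]
    rw [dif_neg (by omega)]
    simp
  | succ k ih =>
    intro w d nw count line hk
    rw [simpleSolInner, dif_pos (by omega)]
    rw [ih w d (nw + 1) _ _ (by omega)]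
    simp only [Prod.mk.injEq]
    refine ⟨?_, ?_⟩
    · rw [List.range_succ_eq_map]
      simp only [List.map_cons, List.map_map, List.append_assoc, List.singleton_append]
      congr 1
      congr 1
      · simp only [min_def]
        push_cast
        split_ifs <;> omega
      · apply List.map_congr_left
        intro j _
        simp only [Function.comp_apply, min_def]
        push_cast
        split_ifs <;> omega
    · simp only [min_def]
      push_cast
      split_ifs <;> omega

-- proof-side description of the remaining rows of the outer loop, given the entering counter
def rowsFrom (w : Int) (d : Int) (count : Int) : Nat → List (List Int)
  | 0 => []
  | m + 1 =>
      ((List.range w.toNat).map (fun j : Nat => min (count + (j : Int)) (d - 1))) ::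
        rowsFrom w d (if w.toNat = 0 then count else min (count + (w.toNat : Int)) d) m

theorem simpleSolOuter_eq (m : Nat) : ∀ (w h_ d nh count : Int) (rez : List (List Int)),
    (h_ - nh).toNat = m →
    simpleSolOuter w h_ d nh count rez = rez ++ rowsFrom w d count m := by
  induction m with
  | zero =>
    intro w h_ d nh count rez hm
    rw [simpleSolOuter, dif_neg (by omega)]
    simp [rowsFrom]
  | succ m ih =>
    intro w h_ d nh count rez hm
    rw [simpleSolOuter, dif_pos (by omega)]
    rw [simpleSolInner_eq w.toNat w d 0 count [] (by omega)]
    rw [ih w h_ d (nh + 1) _ _ (by omega)]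
    simp only [rowsFrom, List.nil_append, List.append_assoc, List.singleton_append]

-- when w ≤ 0, every row is empty
theorem rowsFrom_of_nonpos (m : Nat) (w d count : Int) (hw : w.toNat = 0) :
    rowsFrom w d count m = List.replicate m [] := by
  induction m generalizing count with
  | zero => rfl
  | succ m ih => simp [rowsFrom, hw, ih, List.replicate_succ]

-- when w > 0: if the entering counter is cap-equivalent to the base, rows are the canonical rows
theorem rowsFrom_eq (m : Nat) : ∀ (w d count base : Int), 0 < w →
    (∀ j : Int, 0 ≤ j → min (count + j) (d - 1) = min (base + j) (d - 1)) →
    rowsFrom w d count m =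
      (List.range m).map (fun i : Nat =>
        (List.range w.toNat).map (fun j : Nat => min (base + (i : Int) * w + (j : Int)) (d - 1))) := by
  induction m with
  | zero => intro w d count base _ _; rfl
  | succ m ih =>
    intro w d count base hw hcap
    rw [List.range_succ_eq_map]
    simp only [rowsFrom, List.map_cons, List.map_map]
    congr 1
    · apply List.map_congr_left
      intro j _
      have := hcap (j : Int) (by positivity)
      simpa using this
    · rw [if_neg (by omega)]
      rw [ih w d _ (base + w) hw ?_]
      · apply List.map_congr_left
        intro i _
        simp only [Function.comp_apply]
        apply List.map_congr_left
        intro j _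
        congr 2
        push_cast
        ring
      · intro j hj
        have h1 := hcap ((w.toNat : Int) + j) (by omega)
        have hwt : (w.toNat : Int) = w := by omega
        rw [hwt] at h1 ⊢
        omega

-- canonical form both programs are reduced to
def canonGrid (w : Int) (h_ : Int) (d : Int) : List (List Int) :=
  (List.range h_.toNat).map (fun i : Nat =>
    (List.range w.toNat).map (fun j : Nat => min ((i : Int) * w + (j : Int)) (d - 1)))

theorem simple_sol_eq_canon (w h_ d f : Int) : simple_sol w h_ d f = canonGrid w h_ d := by
  unfold simple_sol canonGrid
  rw [simpleSolOuter_eq h_.toNat w h_ d 0 0 [] (by omega), List.nil_append]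
  by_cases hw : 0 < w
  · rw [rowsFrom_eq h_.toNat w d 0 0 hw (fun j _ => rfl)]
    apply List.map_congr_left
    intro i _
    apply List.map_congr_left
    intro j _
    rw [zero_add]
  · rw [rowsFrom_of_nonpos h_.toNat w d 0 (by omega)]
    have hw0 : w.toNat = 0 := by omega
    simp [hw0, List.map_const']

-- B's flat list is the capped-index sequence
theorem flat_eq (d : Int) (n : Int) (hn : 0 ≤ n) :
    (List.range (min (max d 0) n).toNat).map (fun i : Nat => (i : Int)) ++
      List.replicate (n - min (max d 0) n).toNat (d - 1) =
    (List.range n.toNat).map (fun i : Nat => min (i : Int) (d - 1)) := by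
  set k : Int := min (max d 0) n with hk
  have hsplit : n.toNat = k.toNat + (n - k).toNat := by omega
  rw [hsplit, List.range_add, List.map_append]
  congr 1
  · apply List.map_congr_left
    intro i hi
    simp only [List.mem_range] at hi
    have : (i : Int) < k := by omega
    omega
  · symm
    calc List.map (fun i : Nat => min (i : Int) (d - 1)) (List.map (fun i => k.toNat + i) (List.range (n - k).toNat))
        = List.map (fun _ : Nat => d - 1) (List.range (n - k).toNat) := by
          rw [List.map_map]
          apply List.map_congr_left
          intro i hi
          simp only [List.mem_range] at hi
          simp only [Function.comp_apply]
          push_cast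
          omega
      _ = List.replicate (n - k).toNat (d - 1) := by
          rw [List.map_const', List.length_range]

theorem simple_sol_alt_eq_canon (w h_ d f : Int) : simple_sol_alt w h_ d f = canonGrid w h_ d := by
  unfold simple_sol_alt canonGrid
  simp only
  rw [flat_eq d (max w 0 * max h_ 0) (by positivity)]
  simp only [PySem.List.pyRange_one, Int.sub_zero, List.map_map]
  rw [show (max h_ 0).toNat = h_.toNat from by omega]
  apply List.map_congr_left
  intro r hr
  simp only [List.mem_range] at hr
  simp only [Function.comp_apply, zero_add]
  have hWc : (((max w 0).toNat : Nat) : Int) = max w 0 := by omega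
  have hWeq : (max w 0).toNat = w.toNat := by omega
  have hcast : (r : Int) * max w 0 = ((r * (max w 0).toNat : Nat) : Int) := by push_cast; rw [hWc]
  have hcast2 : ((r : Int) + 1) * max w 0 = ((r * (max w 0).toNat : Nat) : Int) + (((max w 0).toNat : Nat) : Int) := by
    push_cast; rw [hWc]; ring
  rw [hcast, hcast2, PySem.List.slice_natCast_add]
  have hnlen : (max w 0 * max h_ 0).toNat = (max w 0).toNat * h_.toNat := by
    have hmul : max w 0 * max h_ 0 = (((max w 0).toNat * h_.toNat : Nat) : Int) := by
      push_cast; rw [hWc, show ((h_.toNat : Int)) = max h_ 0 from by omega]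
    calc (max w 0 * max h_ 0).toNat
        = (((max w 0).toNat * h_.toNat : Nat) : Int).toNat := by rw [hmul]
      _ = (max w 0).toNat * h_.toNat := Int.toNat_natCast _
  apply List.ext_getElem
  · simp only [List.length_take, List.length_drop, List.length_map, List.length_range, hnlen, hWeq]
    have : r * w.toNat + w.toNat ≤ w.toNat * h_.toNat := by nlinarith
    omega
  · intro j h1 h2
    simp only [List.getElem_take, List.getElem_drop, List.getElem_map, List.getElem_range]
    have hj : j < w.toNat := by
      simp only [List.length_map, List.length_range] at h2; exact h2
    have hwpos : 0 < w := by omega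
    have hwc : (w.toNat : Int) = w := by omega
    push_cast
    rw [hWeq, hwc]

-- ===== VERDICT (by name: the statement is the Claim_ definition above) =====
theorem simple_sol_spec : Claim_equal_simple_sol := by
  intro w h_ d f _hd
  unfold Spec_simple_sol
  rw [simple_sol_eq_canon, simple_sol_alt_eq_canon]
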